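-- pv_equiv track=rewrite | github.com/ZrjaK/algorithm | OJ/leetcode/2509.查询树中环的长度.py | cycleLengthQueries
-- ===== SOURCE A (Python) =====
-- from typing import List
--
-- def cycleLengthQueries(n: int, queries: List[List[int]]) -> List[int]:
--     ans = []
--     for i, j in queries:
--         if i > j:
--             j, i = i, j
--         c1 = c2 = 0
--         while j.bit_length() > i.bit_length():
--             j >>= 1
--             c2 += 1
--         while i != j:
--             c1 += 1
--             c2 += 1
--             i >>= 1
--             j >>= 1
--         ans.append(c1 + c2 + 1)
--     return ans
-- ===== SOURCE B (Python) =====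
-- from typing import List
--
-- def cycleLengthQueries(n: int, queries: List[List[int]]) -> List[int]:
--     def f(i: int, j: int) -> int:
--         a, b = (i, j) if i <= j else (j, i)
--         d = b.bit_length() - a.bit_length()
--         return 2 * ((a ^ (b >> d)).bit_length()) + d + 1
--     return [f(i, j) for i, j in queries]
-- ===== Notes on version B (the rewrite author's own statement) =====
-- stated objective: simpler
-- what changed: Replaces A's two while-loops per query (shift the deeper node up, then shift both up until they meet) by a closed-form bit computation: d = bl(b)-bl(a) aligns depths, k = (a ^ (b>>d)).bit_length() counts the joint steps to the LCA, answer 2*k+d+1, built with a list comprehension.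
-- outside the precondition, e.g. on cycleLengthQueries(1, [[-5, -2]]): A returns [7], B raises ValueError
import Mathlib
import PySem

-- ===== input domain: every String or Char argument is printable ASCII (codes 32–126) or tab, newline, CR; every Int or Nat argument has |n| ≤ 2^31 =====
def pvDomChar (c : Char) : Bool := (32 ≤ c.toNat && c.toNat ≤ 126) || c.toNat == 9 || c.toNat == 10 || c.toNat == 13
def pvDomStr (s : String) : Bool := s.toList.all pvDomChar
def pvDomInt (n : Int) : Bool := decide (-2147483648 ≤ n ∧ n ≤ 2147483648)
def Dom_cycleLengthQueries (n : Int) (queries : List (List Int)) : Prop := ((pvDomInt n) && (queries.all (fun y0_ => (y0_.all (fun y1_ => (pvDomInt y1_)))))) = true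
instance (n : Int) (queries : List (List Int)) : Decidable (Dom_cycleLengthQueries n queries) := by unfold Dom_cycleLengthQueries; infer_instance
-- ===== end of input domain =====

-- B replaces A's per-query while-loops by a closed-form bit computation (2*k+d+1); return-value equivalence on queries of nonnegative [i,j] pairs.


-- ===== PORT A =====
-- `while j.bit_length() > i.bit_length(): j >>= 1; c2 += 1` — fuel is only a totality
-- guard (the loop diverges in Python on some mixed-sign inputs, excluded by Pre_).
def aLoop1 : Nat → Int → Int → Int → Int × Int
  | 0, _, j, c2 => (j, c2)
  | fuel+1, i, j, c2 =>
    if PySem.Int.bitLength j > PySem.Int.bitLength i then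
      aLoop1 fuel i (j >>> (1 : Nat)) (c2 + 1)
    else (j, c2)

-- `while i != j: c1 += 1; c2 += 1; i >>= 1; j >>= 1` — fuel is a totality guard as above.
def aLoop2 : Nat → Int → Int → Int → Int → Int × Int
  | 0, _, _, c1, c2 => (c1, c2)
  | fuel+1, i, j, c1, c2 =>
    if i ≠ j then aLoop2 fuel (i >>> (1 : Nat)) (j >>> (1 : Nat)) (c1 + 1) (c2 + 1)
    else (c1, c2)

def aQuery (i0 j0 : Int) : Int :=
  let p := if i0 > j0 then (j0, i0) else (i0, j0)   -- `if i > j: j, i = i, j`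
  let r1 := aLoop1 (PySem.Int.bitLength p.2) p.1 p.2 0
  let r2 := aLoop2 (PySem.Int.bitLength p.1 + PySem.Int.bitLength r1.1 + 1) p.1 r1.1 0 r1.2
  r2.1 + r2.2 + 1

def cycleLengthQueries (n : Int) (queries : List (List Int)) : List Int :=
  -- `ans = []; for i, j in queries: … ans.append(…)`; a row not of length 2 raises
  -- ValueError in Python (excluded by Pre_), the port appends 0 there.
  queries.foldl (fun ans q =>
    match q with
    | [i, j] => ans ++ [aQuery i j]
    | _ => ans ++ [0]) []

-- ===== PORT B =====
def altQuery (i j : Int) : Int :=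
  let a := min i j
  let b := max i j
  -- d : Nat by truncated subtraction; equals Python's `b.bit_length() - a.bit_length()`
  -- on the nonnegative domain Pre_ admits (there a ≤ b gives bl a ≤ bl b).
  let d := PySem.Int.bitLength b - PySem.Int.bitLength a
  ((2 * PySem.Int.bitLength (PySem.Int.bxor a (b >>> d)) + d + 1 : Nat) : Int)

-- row unpacking `for i, j in …` for B: defined only on rows of length 2 (Pre_); 0 otherwise
def altRow (q : List Int) : Int :=
  if q.length = 2 then altQuery (q.getD 0 0) (q.getD 1 0) else 0

def cycleLengthQueries_alt (n : Int) (queries : List (List Int)) : List Int :=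
  queries.map altRow

-- ===== PRECONDITION & SPEC =====
-- Pre_ restricts to the tree's natural domain — rows that are pairs [i, j] of
-- nonnegative labels: on rows of other lengths Python A raises ValueError, on
-- mixed-sign pairs A diverges, and on pairs of negative labels A's returned shift
-- counts are two's-complement artefacts outside the tree domain (B may raise there).
def Pre_cycleLengthQueries (n : Int) (queries : List (List Int)) : Prop :=
  ∀ q ∈ queries, q.length = 2 ∧ ∀ x ∈ q, 0 ≤ x
instance (n : Int) (queries : List (List Int)) : Decidable (Pre_cycleLengthQueries n queries) := by
  unfold Pre_cycleLengthQueries; infer_instance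

def pvWitness_cycleLengthQueries : Int × List (List Int) := (2, [[1, 2], [7, 5], [0, 9]])

def Spec_cycleLengthQueries (n : Int) (queries : List (List Int)) (out : List Int) : Prop := out = cycleLengthQueries_alt n queries
instance (n : Int) (queries : List (List Int)) (out : List Int) : Decidable (Spec_cycleLengthQueries n queries out) := by unfold Spec_cycleLengthQueries; infer_instance

-- ===== CLAIM (what is proved, stated in full; the proofs are below) =====
def Claim_equal_cycleLengthQueries : Prop := ∀ (n : Int) (queries : List (List Int)), Dom_cycleLengthQueries n queries → Pre_cycleLengthQueries n queries → Spec_cycleLengthQueries n queries (cycleLengthQueries n queries)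

-- ===== LEMMAS AND PROOFS =====

-- bit length of a natural number, seen through the Int-valued PySem primitive
def nbl (m : Nat) : Nat := PySem.Int.bitLength (m : Int)

theorem nbl_zero : nbl 0 = 0 := by decide

theorem nbl_half (m : Nat) : nbl (m / 2) = nbl m - 1 := by
  rcases Nat.eq_zero_or_pos m with h | h
  · subst h; decide
  · have := PySem.Int.bitLength_natCast h
    unfold nbl; omega

theorem nbl_pos (m : Nat) (h : 0 < m) : 0 < nbl m := by
  have := PySem.Int.bitLength_natCast h
  unfold nbl; omega

theorem nbl_lt_two_pow (m : Nat) : m < 2 ^ nbl m := by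
  have := PySem.Int.lt_two_pow_bitLength (m : Int)
  simpa [nbl] using this

theorem two_pow_le_nbl (m : Nat) (h : 0 < m) : 2 ^ (nbl m - 1) ≤ m := by
  have hm : (m : Int) ≠ 0 := by exact_mod_cast h.ne'
  have := PySem.Int.two_pow_bitLength_le (m : Int) hm
  simpa [nbl] using this

theorem nbl_le_of_lt_two_pow {m k : Nat} (h : m < 2 ^ k) : nbl m ≤ k := by
  rcases Nat.eq_zero_or_pos m with h0 | h0
  · subst h0; simp [nbl_zero]
  · have h1 := two_pow_le_nbl m h0
    have h2 := nbl_pos m h0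
    by_contra hc
    have : k ≤ nbl m - 1 := by omega
    have := Nat.pow_le_pow_right (by norm_num : 1 ≤ 2) this
    omega

theorem nbl_mono {m k : Nat} (h : m ≤ k) : nbl m ≤ nbl k :=
  nbl_le_of_lt_two_pow (Nat.lt_of_le_of_lt h (nbl_lt_two_pow k))

theorem nbl_div_pow (m d : Nat) : nbl (m / 2 ^ d) = nbl m - d := by
  induction d generalizing m with
  | zero => simp
  | succ d ih =>
    have : m / 2 ^ (d + 1) = (m / 2) / 2 ^ d := by
      rw [Nat.div_div_eq_div_mul, Nat.pow_succ, Nat.mul_comm]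
    rw [this, ih, nbl_half]; omega

-- the first while-loop shifts j down exactly d = nbl b - nbl a times
theorem aLoop1_eq (d : Nat) : ∀ (a b fuel : Nat) (c2 : Int),
    nbl b = nbl a + d → d ≤ fuel →
    aLoop1 fuel (a : Int) (b : Int) c2 = (((b >>> d : Nat) : Int), c2 + d) := by
  induction d with
  | zero =>
    intro a b fuel c2 hbl hf
    cases fuel with
    | zero => simp [aLoop1]
    | succ f =>
      have : ¬ (PySem.Int.bitLength (b : Int) > PySem.Int.bitLength (a : Int)) := by
        change ¬ (nbl b > nbl a); omega
      simp [aLoop1, this]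
  | succ d ih =>
    intro a b fuel c2 hbl hf
    cases fuel with
    | zero => omega
    | succ f =>
      have hgt : PySem.Int.bitLength (b : Int) > PySem.Int.bitLength (a : Int) := by
        change nbl b > nbl a; omega
      have hb0 : 0 < b := by
        rcases Nat.eq_zero_or_pos b with h | h
        · exfalso; subst h; have := nbl_zero; omega
        · exact h
      have hcast : ((b : Int) >>> (1 : Nat)) = ((b >>> 1 : Nat) : Int) := rfl
      have hrec : nbl (b >>> 1) = nbl a + d := by
        have : b >>> 1 = b / 2 := Nat.shiftRight_one b
        rw [this, nbl_half]
        have := nbl_pos b hb0; omega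
      have hsh : (b >>> 1) >>> d = b >>> (d + 1) := by
        rw [← Nat.shiftRight_add]; congr 1; omega
      simp only [aLoop1, hgt, if_pos]
      rw [hcast, ih a (b >>> 1) f (c2 + 1) hrec (by omega), hsh]
      refine Prod.ext rfl ?_
      push_cast; ring

-- the second while-loop runs exactly k = nbl (a ^^^ b) times when bit lengths agree
theorem aLoop2_eq (k : Nat) : ∀ (a b fuel : Nat) (c1 c2 : Int),
    nbl a = nbl b → nbl (a ^^^ b) = k → k ≤ fuel →
    aLoop2 fuel (a : Int) (b : Int) c1 c2 = (c1 + k, c2 + k) := by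
  induction k with
  | zero =>
    intro a b fuel c1 c2 hbl hk hf
    have hab : a = b := by
      have : a ^^^ b = 0 := by
        by_contra h
        have := nbl_pos (a ^^^ b) (Nat.pos_of_ne_zero h); omega
      exact Nat.xor_eq_zero_iff.mp this
    subst hab
    cases fuel with
    | zero => simp [aLoop2]
    | succ f => simp [aLoop2]
  | succ k ih =>
    intro a b fuel c1 c2 hbl hk hf
    cases fuel with
    | zero => omega
    | succ f =>
      have hne : a ≠ b := by
        intro h; subst h; simp [Nat.xor_self] at hk; rw [← Nat.xor_self a] at hk
        simp [Nat.xor_self, nbl_zero] at hk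
      have hneI : (a : Int) ≠ (b : Int) := by exact_mod_cast hne
      have ha0 : 0 < a := by
        rcases Nat.eq_zero_or_pos a with h | h
        · exfalso; subst h
          have h0 : nbl 0 = 0 := nbl_zero
          have hb' : b = 0 := by
            by_contra hb; have := nbl_pos b (Nat.pos_of_ne_zero hb); omega
          exact hne (by omega)
        · exact h
      have hb0 : 0 < b := by
        rcases Nat.eq_zero_or_pos b with h | h
        · exfalso; subst h
          have h0 : nbl 0 = 0 := nbl_zero
          have ha' : a = 0 := by
            by_contra hb; have := nbl_pos a (Nat.pos_of_ne_zero hb); omega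
          exact hne (by omega)
        · exact h
      have hxhalf : (a / 2) ^^^ (b / 2) = (a ^^^ b) / 2 := (Nat.xor_div_two).symm
      have hrecbl : nbl (a / 2) = nbl (b / 2) := by
        rw [nbl_half, nbl_half, hbl]
      have hreck : nbl ((a / 2) ^^^ (b / 2)) = k := by
        rw [hxhalf, nbl_half, hk]
        have hx0 : 0 < a ^^^ b := by
          rcases Nat.eq_zero_or_pos (a ^^^ b) with h | h
          · exact absurd (Nat.xor_eq_zero_iff.mp h) hne
          · exact h
        omega
      have hcast1 : ((a : Int) >>> (1 : Nat)) = ((a / 2 : Nat) : Int) := by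
        show ((a >>> 1 : Nat) : Int) = _
        rw [Nat.shiftRight_one]
      have hcast2 : ((b : Int) >>> (1 : Nat)) = ((b / 2 : Nat) : Int) := by
        show ((b >>> 1 : Nat) : Int) = _
        rw [Nat.shiftRight_one]
      simp only [aLoop2, hneI, ne_eq, not_false_eq_true, if_pos]
      rw [hcast1, hcast2, ih (a / 2) (b / 2) f (c1 + 1) (c2 + 1) hrecbl hreck (by omega)]
      refine Prod.ext ?_ ?_ <;> (show _ = _; push_cast; ring)

-- xor of two numbers below 2^(nbl a) keeps bit length ≤ nbl a
theorem nbl_xor_le (a b : Nat) (h : nbl b ≤ nbl a) : nbl (a ^^^ b) ≤ nbl a := by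
  have ha := nbl_lt_two_pow a
  have hb : b < 2 ^ nbl a :=
    Nat.lt_of_lt_of_le (nbl_lt_two_pow b) (Nat.pow_le_pow_right (by norm_num) h)
  exact nbl_le_of_lt_two_pow (Nat.xor_lt_two_pow ha hb)

-- the per-query closed form agrees with the two loops, for 0 ≤ a ≤ b (as naturals)
theorem query_eq_nat (a b : Nat) (hab : a ≤ b) :
    aQuery (a : Int) (b : Int) = altQuery (a : Int) (b : Int) := by
  have hmono := nbl_mono hab
  set d := nbl b - nbl a with hd
  have hbl : nbl b = nbl a + d := by omega
  have hnotgt : ¬ ((a : Int) > (b : Int)) := by exact_mod_cast Nat.not_lt.mpr hab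
  have hbl2 : nbl (b >>> d) = nbl a := by
    rw [Nat.shiftRight_eq_div_pow, nbl_div_pow]; omega
  set k := nbl (a ^^^ (b >>> d)) with hk
  have hkle : k ≤ nbl a := nbl_xor_le a (b >>> d) (by omega)
  unfold aQuery
  simp only [hnotgt]
  rw [show ((if False then ((b:Int), (a:Int)) else ((a:Int), (b:Int))) = ((a:Int),(b:Int))) from rfl]
  have h1 : aLoop1 (PySem.Int.bitLength (b : Int)) (a : Int) (b : Int) 0
      = (((b >>> d : Nat) : Int), (0 : Int) + d) := by
    apply aLoop1_eq d a b _ 0 hbl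
    show d ≤ nbl b; omega
  rw [h1]
  have h2 : aLoop2 (PySem.Int.bitLength (a : Int) + PySem.Int.bitLength (((b >>> d : Nat)) : Int) + 1)
      (a : Int) ((b >>> d : Nat) : Int) 0 ((0 : Int) + d)
      = ((0 : Int) + k, ((0 : Int) + d) + k) := by
    apply aLoop2_eq k a (b >>> d) _ 0 _ (by rw [hbl2]) rfl
    show k ≤ nbl a + nbl (b >>> d) + 1; omega
  rw [h2]
  unfold altQuery
  have hmin : min (a : Int) (b : Int) = (a : Int) := by exact_mod_cast Nat.min_eq_left hab
  have hmax : max (a : Int) (b : Int) = (b : Int) := by exact_mod_cast Nat.max_eq_right hab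
  simp only [hmin, hmax]
  have hdd : PySem.Int.bitLength (b : Int) - PySem.Int.bitLength (a : Int) = d := by
    show nbl b - nbl a = d; omega
  rw [hdd]
  have hshift : ((b : Int) >>> d) = ((b >>> d : Nat) : Int) := rfl
  rw [hshift, PySem.Int.bxor_natCast]
  show (0 : Int) + k + ((0 : Int) + d + k) + 1 = ((2 * k + d + 1 : Nat) : Int)
  push_cast; ring

theorem query_eq (i j : Int) (hi : 0 ≤ i) (hj : 0 ≤ j) : aQuery i j = altQuery i j := by
  lift i to Nat using hi
  lift j to Nat using hj
  rcases le_or_gt i j with h | h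
  · exact query_eq_nat i j h
  · have hgt : (i : Int) > (j : Int) := by exact_mod_cast h
    have h2 : ¬ ((j : Int) > (i : Int)) := not_lt.mpr (le_of_lt hgt)
    have key := query_eq_nat j i (le_of_lt h)
    have hswapA : aQuery (i : Int) (j : Int) = aQuery (j : Int) (i : Int) := by
      unfold aQuery; simp [hgt, h2]
    have hswapB : altQuery (i : Int) (j : Int) = altQuery (j : Int) (i : Int) := by
      unfold altQuery; rw [min_comm, max_comm]
    rw [hswapA, key, hswapB]

-- the fold with append equals accumulator ++ map
theorem fold_map (queries : List (List Int))
    (hq : ∀ q ∈ queries, q.length = 2 ∧ ∀ x ∈ q, 0 ≤ x) :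
    ∀ acc : List Int,
      queries.foldl (fun ans q =>
        match q with
        | [i, j] => ans ++ [aQuery i j]
        | _ => ans ++ [0]) acc
      = acc ++ queries.map altRow := by
  induction queries with
  | nil => intro acc; simp
  | cons q qs ih =>
    intro acc
    obtain ⟨hlen, hpos⟩ := hq q (List.mem_cons_self)
    match q, hlen with
    | [i, j], _ =>
      have hi : 0 ≤ i := hpos i (by simp)
      have hj : 0 ≤ j := hpos j (by simp)
      simp only [List.foldl_cons, List.map_cons]
      rw [ih (fun q hq' => hq q (List.mem_cons_of_mem _ hq'))]
      rw [query_eq i j hi hj]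
      simp [altRow]

-- ===== VERDICT (by name: the statement is the Claim_ definition above) =====
theorem cycleLengthQueries_spec : Claim_equal_cycleLengthQueries := by
  intro n queries _ hpre
  unfold Spec_cycleLengthQueries cycleLengthQueries cycleLengthQueries_alt
  rw [fold_map queries hpre []]
  simp
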